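-- pv_equiv track=rewrite | github.com/Anastasia-D-Kravchenko/PPY | for_exam/second.py | check_game_over
-- ===== SOURCE A (Python) =====
-- def check_game_over(results):
--     consecutive_losses = 0
--     for result in results:
--         if result == 'loss':
--             consecutive_losses += 1
--         else:
--             consecutive_losses = 0  # RESET counter on win/draw
--
--         if consecutive_losses == 2:
--             return "Game Over: 2 losses in a row!"
--     return "Game finished normally."
-- ===== SOURCE B (Python) =====
-- def check_game_over(results):
--     positions = [i for i, r in enumerate(results) if r == 'loss']
--     for i, j in zip(positions, positions[1:]):
--         if j - i == 1:
--             return "Game Over: 2 losses in a row!"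
--     return "Game finished normally."
-- ===== Notes on version B (the rewrite author's own statement) =====
-- stated objective: alternative
-- what changed: Two staged passes: first collect the indices of all 'loss' entries, then scan that index list for two consecutive indices differing by 1, instead of A's single pass with a reset-on-win run counter.
import Mathlib
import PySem

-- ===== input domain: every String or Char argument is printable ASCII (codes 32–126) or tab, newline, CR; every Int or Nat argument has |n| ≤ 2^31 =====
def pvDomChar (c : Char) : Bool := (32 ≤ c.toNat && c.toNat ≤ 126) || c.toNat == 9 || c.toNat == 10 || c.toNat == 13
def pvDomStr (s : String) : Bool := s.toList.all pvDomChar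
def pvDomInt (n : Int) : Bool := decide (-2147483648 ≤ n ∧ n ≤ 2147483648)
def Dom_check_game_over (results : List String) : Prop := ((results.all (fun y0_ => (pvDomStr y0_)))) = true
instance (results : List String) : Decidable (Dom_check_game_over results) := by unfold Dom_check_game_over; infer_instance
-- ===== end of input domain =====

-- B replaces A's single-pass reset-on-win counter with two staged passes
-- (collect the indices of 'loss' entries, then look for two consecutive indices); same cost.

-- ===== PORT A =====
-- A's loop: consecutive_losses counter, reset on non-loss, early return at 2
def checkGoA (c : Int) : List String → String
  | [] => "Game finished normally."
  | result :: rest =>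
    let c' := if result = "loss" then c + 1 else 0
    if c' = 2 then "Game Over: 2 losses in a row!" else checkGoA c' rest

def check_game_over (results : List String) : String := checkGoA 0 results

-- ===== PORT B =====
-- B: positions = [i for i, r in enumerate(results) if r == 'loss'];
--    then scan zip(positions, positions[1:]) for a gap of 1 (positions[1:] via PySem slice)
def check_game_over_alt (results : List String) : String :=
  let positions := ((PySem.List.enumerate results).filter (fun p => p.2 == "loss")).map (·.1)
  if (positions.zip (PySem.List.slice positions (some 1) none)).any
      (fun p => p.2 - p.1 == 1)
  then "Game Over: 2 losses in a row!"
  else "Game finished normally."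

-- ===== PRECONDITION & SPEC =====
def Spec_check_game_over (results : List String) (out : String) : Prop := out = check_game_over_alt results
instance (results : List String) (out : String) : Decidable (Spec_check_game_over results out) := by unfold Spec_check_game_over; infer_instance

-- ===== CLAIM (what is proved, stated in full; the proofs are below) =====
def Claim_equal_check_game_over : Prop := ∀ (results : List String), Dom_check_game_over results → Spec_check_game_over results (check_game_over results)

-- ===== LEMMAS AND PROOFS =====

-- abstract pictures of the two programs
def hasPair : List String → Bool
  | a :: b :: r => (a == "loss" && b == "loss") || hasPair (b :: r)
  | _ => false

def outOf (b : Bool) : String :=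
  if b then "Game Over: 2 losses in a row!" else "Game finished normally."

def lossPos (s : Int) : List String → List Int
  | [] => []
  | x :: r => if x = "loss" then s :: lossPos (s + 1) r else lossPos (s + 1) r

def anyAdj (l : List Int) : Bool :=
  (l.zip l.tail).any (fun p => p.2 - p.1 == 1)

theorem lossPos_eq (s : Int) (l : List String) :
    ((PySem.List.enumerate l s).filter (fun p => p.2 == "loss")).map (·.1) = lossPos s l := by
  induction l generalizing s with
  | nil => rfl
  | cons x r ih =>
    by_cases hx : x = "loss" <;>
      simp [PySem.List.enumerate_cons, List.filter, hx, lossPos, ih]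

theorem lossPos_ge (s : Int) (l : List String) : ∀ x ∈ lossPos s l, s ≤ x := by
  induction l generalizing s with
  | nil => simp [lossPos]
  | cons y r ih =>
    intro x hx
    by_cases hy : y = "loss" <;> simp [lossPos, hy] at hx
    · rcases hx with h | h
      · omega
      · have := ih (s + 1) x h; omega
    · have := ih (s + 1) x hx; omega

theorem anyAdj_cons_cons (a b : Int) (r : List Int) :
    anyAdj (a :: b :: r) = ((b - a == 1) || anyAdj (b :: r)) := rfl

theorem anyAdj_lossPos (l : List String) (s : Int) : anyAdj (lossPos s l) = hasPair l := by
  induction l generalizing s with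
  | nil => rfl
  | cons x r ih =>
    by_cases hx : x = "loss"
    · subst hx
      cases r with
      | nil => rfl
      | cons y r' =>
        by_cases hy : y = "loss"
        · subst hy
          simp [lossPos, anyAdj_cons_cons, hasPair]
        · have htail : lossPos (s + 1) (y :: r') = lossPos (s + 2) r' := by
            simp [lossPos, hy]; ring_nf
          have hge := lossPos_ge (s + 2) r'
          have hA : anyAdj (s :: lossPos (s + 2) r') = anyAdj (lossPos (s + 2) r') := by
            cases h : lossPos (s + 2) r' with
            | nil => rfl
            | cons z zs =>
              have hz : s + 2 ≤ z := hge z (by rw [h]; exact List.mem_cons_self)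
              rw [anyAdj_cons_cons]
              have : (z - s == 1) = false := by simp; omega
              simp [this]
          have hIH : anyAdj (lossPos (s + 1) (y :: r')) = hasPair (y :: r') := ih (s + 1)
          rw [htail] at hIH
          have hP : hasPair (y :: r') = hasPair r' := by
            cases r' with
            | nil => rfl
            | cons b rb => simp [hasPair, hy]
          rw [hP] at hIH
          have hP2 : hasPair ("loss" :: y :: r') = hasPair r' := by
            simp [hasPair, hy, hP]
          show anyAdj (s :: lossPos (s + 1) (y :: r')) = hasPair ("loss" :: y :: r')
          rw [htail, hA, hIH, hP2]
    · have : lossPos s (x :: r) = lossPos (s + 1) r := by simp [lossPos, hx]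
      rw [this, ih (s + 1)]
      cases r with
      | nil => rfl
      | cons b rb => simp [hasPair, hx]

theorem anyAdj_lossPos' (l : List String) (s : Int) :
    ((lossPos s l).zip (lossPos s l).tail).any (fun p => p.2 - p.1 == 1) = hasPair l :=
  anyAdj_lossPos l s

theorem alt_eq_outOf (l : List String) : check_game_over_alt l = outOf (hasPair l) := by
  simp only [check_game_over_alt, outOf]
  rw [PySem.List.slice_from_one, lossPos_eq, anyAdj_lossPos']

def headLoss : List String → Bool
  | [] => false
  | x :: _ => x == "loss"

theorem a_eq_outOf (l : List String) :
    checkGoA 0 l = outOf (hasPair l) ∧ checkGoA 1 l = outOf (headLoss l || hasPair l) := by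
  induction l with
  | nil => constructor <;> rfl
  | cons x r ih =>
    refine ⟨?_, ?_⟩
    · by_cases hx : x = "loss"
      · subst hx
        have h1 : hasPair ("loss" :: r) = (headLoss r || hasPair r) := by
          cases r with
          | nil => rfl
          | cons b rb => simp [hasPair, headLoss]
        simpa [checkGoA, h1] using ih.2
      · have hP : hasPair (x :: r) = hasPair r := by
          cases r with
          | nil => rfl
          | cons b rb => simp [hasPair, hx]
        simpa [checkGoA, hx, hP] using ih.1
    · by_cases hx : x = "loss"
      · subst hx; simp [checkGoA, headLoss, outOf]
      · have hb : (x == "loss") = false := by simp [hx]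
        have hP : hasPair (x :: r) = hasPair r := by
          cases r with
          | nil => rfl
          | cons b rb => simp [hasPair, hx]
        simpa [checkGoA, hx, headLoss, hb, hP] using ih.1

-- ===== VERDICT (by name: the statement is the Claim_ definition above) =====
theorem check_game_over_spec : Claim_equal_check_game_over := by
  intro results _
  unfold Spec_check_game_over check_game_over
  rw [(a_eq_outOf results).1, alt_eq_outOf]
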